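-- pv_equiv track=rewrite | github.com/Ptrak/AdventOfCode2019 | problem3/solution.py | convert_to_xsegments
-- ===== SOURCE A (Python) =====
-- def convert_to_xsegments(points):
--     xsegments = [0]
--     i = 0
--     x = 0
--     while i < len(points):
--         if points[i][0] == 'R':
--             x += int(points[i][1:])
--         if points[i][0] == 'L':
--             x -= int(points[i][1:])
--         i += 1
--         xsegments.append(x)
--     return xsegments
-- ===== SOURCE B (Python) =====
-- def convert_to_xsegments(points):
--     # Different strategy: first compute the FINAL x by summing all deltas, then
--     # walk the commands BACKWARDS, emitting the position after each command from
--     # the last one back to the start, and reverse the collected list once.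
--     def delta(p):
--         if p[0] == 'R':
--             return int(p[1:])
--         if p[0] == 'L':
--             return -int(p[1:])
--         return 0
--
--     t = sum(delta(p) for p in points)
--     out = []
--     for p in reversed(points):
--         out.append(t)
--         t -= delta(p)
--     out.append(t)
--     out.reverse()
--     return out
-- ===== Notes on version B (the rewrite author's own statement) =====
-- stated objective: alternative
-- what changed: Instead of A's forward loop with a running accumulator appended at each step, B first sums all deltas to get the final position, then traverses the commands in reverse subtracting each delta, building the output back-to-front and reversing it once.
import Mathlib
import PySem

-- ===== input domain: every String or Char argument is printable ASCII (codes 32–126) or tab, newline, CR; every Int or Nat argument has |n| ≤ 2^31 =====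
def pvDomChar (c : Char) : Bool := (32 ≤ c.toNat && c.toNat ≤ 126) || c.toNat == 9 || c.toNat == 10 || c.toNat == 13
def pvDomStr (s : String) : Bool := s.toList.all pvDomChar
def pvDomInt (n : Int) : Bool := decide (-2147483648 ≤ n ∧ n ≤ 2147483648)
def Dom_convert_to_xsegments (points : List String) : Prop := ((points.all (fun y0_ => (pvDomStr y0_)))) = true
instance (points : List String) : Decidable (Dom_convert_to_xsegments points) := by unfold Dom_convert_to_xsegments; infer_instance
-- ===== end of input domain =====

-- B sums all deltas first, then walks the commands backwards building the output back-to-front, instead of A's forward running-sum loop; same O(n) cost.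

-- ===== PORT A =====
-- A's while loop over index i, carrying the running x and accumulated xsegments;
-- p[0] is p.toList.head? (IndexError on "" excluded by Pre_), int(p[1:]) is
-- PySem.Int.ofChars? p.toList.tail (ValueError = none, excluded by Pre_)
def convertGoA : List String → Int → List Int → List Int
  | [], _, xsegments => xsegments
  | p :: rest, x, xsegments =>
    let x1 := if p.toList.head? = some 'R' then x + (PySem.Int.ofChars? p.toList.tail).getD 0 else x
    let x2 := if p.toList.head? = some 'L' then x1 - (PySem.Int.ofChars? p.toList.tail).getD 0 else x1
    convertGoA rest x2 (xsegments ++ [x2])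

def convert_to_xsegments (points : List String) : List Int :=
  convertGoA points 0 [0]

-- ===== PORT B =====
-- Source B's helper delta(p): if/return chain
def xdelta (p : String) : Int :=
  if p.toList.head? = some 'R' then (PySem.Int.ofChars? p.toList.tail).getD 0
  else if p.toList.head? = some 'L' then -((PySem.Int.ofChars? p.toList.tail).getD 0)
  else 0

-- t = sum(delta(p) for p in points); then 'for p in reversed(points): out.append(t); t -= delta(p)'
-- as a foldl over points.reverse carrying (out, t); finally out.append(t); out.reverse()
def convert_to_xsegments_alt (points : List String) : List Int :=
  let t := (points.map xdelta).sum
  let st := points.reverse.foldl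
    (fun (st : List Int × Int) p => (st.1 ++ [st.2], st.2 - xdelta p)) ([], t)
  (st.1 ++ [st.2]).reverse

-- ===== PRECONDITION & SPEC =====
-- Pre_ excludes exactly the inputs on which Python A raises: an empty command string
-- (IndexError on p[0]) or an R/L command whose remainder is not a valid int literal (ValueError).
def Pre_convert_to_xsegments (points : List String) : Prop :=
  ∀ p ∈ points, p.toList ≠ [] ∧
    ((p.toList.head? = some 'R' ∨ p.toList.head? = some 'L') →
      (PySem.Int.ofChars? p.toList.tail).isSome = true)
instance (points : List String) : Decidable (Pre_convert_to_xsegments points) := by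
  unfold Pre_convert_to_xsegments; infer_instance

def pvWitness_convert_to_xsegments : List String := ["R8", "L3", "U2", "D5"]

def Spec_convert_to_xsegments (points : List String) (out : List Int) : Prop := out = convert_to_xsegments_alt points
instance (points : List String) (out : List Int) : Decidable (Spec_convert_to_xsegments points out) := by unfold Spec_convert_to_xsegments; infer_instance

-- ===== CLAIM =====
def Claim_equal_convert_to_xsegments : Prop := ∀ (points : List String), Dom_convert_to_xsegments points → Pre_convert_to_xsegments points → Spec_convert_to_xsegments points (convert_to_xsegments points)

-- ===== LEMMAS AND PROOFS =====

-- canonical prefix-sum list both sides are shown equal to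
def pref : List Int → Int → List Int
  | [], x => [x]
  | d :: ds, x => x :: pref ds (x + d)

-- pref always starts with its second argument
theorem pref_head (ds : List Int) (x : Int) : ∃ tl, pref ds x = x :: tl := by
  cases ds <;> exact ⟨_, rfl⟩

-- A's combined two-if update of x is exactly adding B's delta
theorem step_eq (p : String) (x : Int) :
    (let x1 := if p.toList.head? = some 'R' then x + (PySem.Int.ofChars? p.toList.tail).getD 0 else x
     if p.toList.head? = some 'L' then x1 - (PySem.Int.ofChars? p.toList.tail).getD 0 else x1)
      = x + xdelta p := by
  unfold xdelta
  by_cases hR : p.toList.head? = some 'R' <;> by_cases hL : p.toList.head? = some 'L' <;>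
    simp [hR, hL] at * <;> omega

-- A's forward loop computes the prefix-sum list of the deltas
theorem goA_eq_pref (pts : List String) (x : Int) (acc : List Int) :
    convertGoA pts x acc = acc ++ (pref (pts.map xdelta) x).tail := by
  induction pts generalizing x acc with
  | nil => simp [convertGoA, pref]
  | cons p rest ih =>
    simp only [convertGoA]
    rw [step_eq p x, ih (x + xdelta p) (acc ++ [x + xdelta p])]
    obtain ⟨tl, htl⟩ := pref_head (rest.map xdelta) (x + xdelta p)
    simp [pref, htl]

-- B's reverse loop as a foldr over points: the running t ends at t minus the delta sum
theorem foldr_snd (pts : List String) (t : Int) :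
    (pts.foldr (fun p (st : List Int × Int) => (st.1 ++ [st.2], st.2 - xdelta p)) ([], t)).2
      = t - (pts.map xdelta).sum := by
  induction pts with
  | nil => simp
  | cons p rest ih => simp [ih]; ring

-- B's reverse loop (as a foldr) builds the reversed prefix-sum list
theorem foldr_eq_pref (pts : List String) (t : Int) :
    ((pts.foldr (fun p (st : List Int × Int) => (st.1 ++ [st.2], st.2 - xdelta p)) ([], t)).1
      ++ [(pts.foldr (fun p (st : List Int × Int) => (st.1 ++ [st.2], st.2 - xdelta p)) ([], t)).2]).reverse
      = pref (pts.map xdelta) (t - (pts.map xdelta).sum) := by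
  induction pts with
  | nil => simp [pref]
  | cons p rest ih =>
    have h2 := foldr_snd rest t
    simp only [List.foldr_cons] at *
    generalize hst : (rest.foldr (fun p (st : List Int × Int) => (st.1 ++ [st.2], st.2 - xdelta p)) ([], t)) = st' at *
    obtain ⟨out, tv⟩ := st'
    simp only at *
    subst h2
    simp only [List.map_cons, List.sum_cons, pref]
    have e1 : t - (xdelta p + (rest.map xdelta).sum) = t - (rest.map xdelta).sum - xdelta p := by ring
    have e2 : t - (rest.map xdelta).sum - xdelta p + xdelta p = t - (rest.map xdelta).sum := by ring
    rw [e1, e2, ← ih]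
    simp

-- B's port equals the prefix-sum list from 0
theorem alt_eq_pref (pts : List String) :
    convert_to_xsegments_alt pts = pref (pts.map xdelta) 0 := by
  simp only [convert_to_xsegments_alt, List.foldl_reverse]
  have h := foldr_eq_pref pts ((pts.map xdelta).sum)
  simp only [sub_self] at h
  exact h

-- ===== VERDICT =====
theorem convert_to_xsegments_spec : Claim_equal_convert_to_xsegments := by
  intro points _ _
  unfold Spec_convert_to_xsegments convert_to_xsegments
  rw [goA_eq_pref points 0 [0], alt_eq_pref]
  obtain ⟨tl, htl⟩ := pref_head (points.map xdelta) 0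
  rw [htl]; simp
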